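-- pv_equiv track=rewrite | github.com/krzysztof-turowski/programming-contests | google-code-jam/2010-round-1a/rotate.py | find
-- ===== SOURCE A (Python) =====
-- def find(A, N, K, c):
--     for i in range(N):
--         index = 0
--         for j in range(N):
--             index = index + 1 if A[i][j] == c else 0
--             if index == K:
--                 return True
--         index = 0
--         for j in range(N):
--             index = index + 1 if A[j][i] == c else 0
--             if index == K:
--                 return True
--     for inv in range(2 * N):
--         index = 0
--         for i in range(N):
--             if inv - i >= N or inv - i < 0:
--                 continue
--             index = index + 1 if A[i][inv - i] == c else 0
--             if index == K:
--                 return True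
--         index = 0
--         for i in range(N):
--             if i + inv - N >= N or i + inv - N < 0:
--                 continue
--             index = index + 1 if A[i][inv + i - N] == c else 0
--             if index == K:
--                 return True
--     return False
-- ===== SOURCE B (Python) =====
-- def find(A, N, K, c):
--     # For each cell, walk backwards along each of the four scan directions
--     # counting the run of c-cells ending there, and compare it to K.
--     def back(i, j, di, dj):
--         length = 0
--         while 0 <= i < N and 0 <= j < N and A[i][j] == c:
--             length += 1
--             i -= di
--             j -= dj
--         return length
--
--     return any(K == back(i, j, di, dj)
--                for i in range(N)
--                for j in range(N)
--                for di, dj in ((0, 1), (1, 0), (1, 1), (1, -1)))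
-- ===== Notes on version B (the rewrite author's own statement) =====
-- stated objective: alternative
-- what changed: B drops A's four per-line forward scans with an early-exit counter and instead, for every cell and each of the four scan directions, walks backwards counting the run of c-cells ending at that cell and compares it to K (worst-case O(N^3) instead of O(N^2), but shorter and uniform). Pre_ excludes grids smaller than N x N, where A's out-of-range indexing can raise IndexError at a different point of its traversal than B's.
import Mathlib
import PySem

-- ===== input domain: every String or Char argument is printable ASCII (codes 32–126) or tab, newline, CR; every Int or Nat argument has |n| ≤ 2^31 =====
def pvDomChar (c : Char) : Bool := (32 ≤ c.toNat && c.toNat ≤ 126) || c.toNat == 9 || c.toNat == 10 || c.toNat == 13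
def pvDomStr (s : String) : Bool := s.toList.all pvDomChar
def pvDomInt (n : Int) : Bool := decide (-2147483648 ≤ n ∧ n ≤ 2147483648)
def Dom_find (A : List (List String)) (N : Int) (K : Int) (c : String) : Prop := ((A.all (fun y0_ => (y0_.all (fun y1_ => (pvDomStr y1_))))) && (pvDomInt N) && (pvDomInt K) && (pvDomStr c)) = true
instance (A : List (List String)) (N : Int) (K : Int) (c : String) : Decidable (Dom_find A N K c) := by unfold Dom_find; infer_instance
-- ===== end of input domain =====

-- B replaces A's four per-line forward scans by a per-cell backward run walk in each of the four
-- directions (alternative decomposition; worst-case slower, not claimed faster). Return value only.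

-- ===== PORT A =====
-- A[i][j]; exact under Pre_find (both indices in range there; Python raises outside Pre_find)
def pvCell (A : List (List String)) (i j : Int) : String :=
  ((PySem.List.pyGet? A i).bind (fun r => PySem.List.pyGet? r j)).getD ""

def find (A : List (List String)) (N : Int) (K : Int) (c : String) : Bool :=
  let part1 := (PySem.List.pyRange 0 N 1).foldl (fun acc i =>
    if acc then acc else
      let row := ((PySem.List.pyRange 0 N 1).foldl (fun (st : Bool × Int) j =>
          if st.1 then st else
            let idx := if pvCell A i j == c then st.2 + 1 else 0
            (idx == K, idx)) (false, 0)).1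
      if row then true else
      ((PySem.List.pyRange 0 N 1).foldl (fun (st : Bool × Int) j =>
          if st.1 then st else
            let idx := if pvCell A j i == c then st.2 + 1 else 0
            (idx == K, idx)) (false, 0)).1) false
  if part1 then true else
  (PySem.List.pyRange 0 (2*N) 1).foldl (fun acc inv =>
    if acc then acc else
      let anti := ((PySem.List.pyRange 0 N 1).foldl (fun (st : Bool × Int) i =>
          if st.1 then st else
            if inv - i ≥ N ∨ inv - i < 0 then st else
            let idx := if pvCell A i (inv - i) == c then st.2 + 1 else 0
            (idx == K, idx)) (false, 0)).1
      if anti then true else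
      ((PySem.List.pyRange 0 N 1).foldl (fun (st : Bool × Int) i =>
          if st.1 then st else
            if i + inv - N ≥ N ∨ i + inv - N < 0 then st else
            let idx := if pvCell A i (inv + i - N) == c then st.2 + 1 else 0
            (idx == K, idx)) (false, 0)).1) false

-- ===== PORT B =====
-- the `while 0 <= i < N and 0 <= j < N and A[i][j] == c` loop of Source B's back(), with an explicit
-- fuel bound: for the four directions used ((0,1),(1,0),(1,1),(1,-1)) one of i, j strictly
-- decreases while staying ≥ 0, so i.toNat + j.toNat + 1 steps always suffice (totalization only)
def pvBackLoop (A : List (List String)) (N : Int) (c : String) :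
    Nat → Int → Int → Int → Int → Int → Int
  | 0, _, _, _, _, len => len
  | fuel+1, i, j, di, dj, len =>
    if 0 ≤ i ∧ i < N ∧ 0 ≤ j ∧ j < N ∧ pvCell A i j == c then
      pvBackLoop A N c fuel (i - di) (j - dj) di dj (len + 1)
    else len

def pvBack (A : List (List String)) (N : Int) (c : String) (i j di dj : Int) : Int :=
  pvBackLoop A N c (i.toNat + j.toNat + 1) i j di dj 0

def find_alt (A : List (List String)) (N : Int) (K : Int) (c : String) : Bool :=
  (PySem.List.pyRange 0 N 1).any fun i =>
    (PySem.List.pyRange 0 N 1).any fun j =>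
      ([((0:Int),(1:Int)), (1,0), (1,1), (1,-1)]).any fun d =>
        K == pvBack A N c i j d.1 d.2

-- ===== PRECONDITION & SPEC =====
-- Pre_find excludes grids smaller than N x N: there Python A's indexing can raise IndexError (or
-- return True before reaching an out-of-range cell), and B's traversal order reaches its
-- out-of-range access (IndexError) at a different point than A's.
def Pre_find (A : List (List String)) (N : Int) (K : Int) (c : String) : Prop :=
  N.toNat ≤ A.length ∧ ∀ r ∈ A.take N.toNat, N.toNat ≤ r.length
instance (A : List (List String)) (N : Int) (K : Int) (c : String) : Decidable (Pre_find A N K c) := by unfold Pre_find; infer_instance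

def pvWitness_find : List (List String) × Int × Int × String := ([["x","y"],["y","x"]], 2, 2, "x")

def Spec_find (A : List (List String)) (N : Int) (K : Int) (c : String) (out : Bool) : Prop := out = find_alt A N K c
instance (A : List (List String)) (N : Int) (K : Int) (c : String) (out : Bool) : Decidable (Spec_find A N K c out) := by unfold Spec_find; infer_instance

-- ===== CLAIM (what is proved, stated in full; the proofs are below) =====
def Claim_equal_find : Prop := ∀ (A : List (List String)) (N : Int) (K : Int) (c : String), Dom_find A N K c → Pre_find A N K c → Spec_find A N K c (find A N K c)

-- ===== LEMMAS AND PROOFS =====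

-- the counter step of A's scans and the run values it takes along a line
def pvStep (c : String) (a : Int) (x : String) : Int := if x == c then a + 1 else 0

def pvRuns (c : String) : Int → List String → List Int
  | _, [] => []
  | a, x :: l => let a' := pvStep c a x; a' :: pvRuns c a' l

def pvRun (c : String) (f : Nat → String) : Nat → Int
  | 0 => pvStep c 0 (f 0)
  | p+1 => pvStep c (pvRun c f p) (f (p+1))

-- early-exit or-fold = any
theorem pv_foldl_or {β : Type} (l : List β) (f : β → Bool) (b : Bool) :
    l.foldl (fun acc i => if acc then acc else f i) b = (b || l.any f) := by
  induction l generalizing b with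
  | nil => simp
  | cons x xs ih => cases b <;> simp [List.foldl, ih]

theorem pv_if_or (a b : Bool) : (if a = true then true else b) = (a || b) := by
  cases a <;> rfl

theorem pv_any_or {β : Type} (l : List β) (f g : β → Bool) :
    (l.any fun i => if f i then true else g i) = (l.any f || l.any g) := by
  induction l with
  | nil => rfl
  | cons x xs ih =>
    simp only [List.any_cons, ih]
    cases f x <;> cases g x <;> cases xs.any f <;> cases xs.any g <;> rfl

theorem pv_any_congr {α : Type} (l : List α) (f g : α → Bool)
    (h : ∀ a ∈ l, f a = g a) : l.any f = l.any g := by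
  induction l with
  | nil => rfl
  | cons x xs ih =>
    simp only [List.any_cons, h x (by simp), ih (fun a ha => h a (by simp [ha]))]

theorem pv_foldl_guard {α β : Type} (l : List β) (q : β → Bool) (g : α → β → α) (a : α) :
    l.foldl (fun s x => if q x then g s x else s) a = (l.filter q).foldl g a := by
  induction l generalizing a with
  | nil => rfl
  | cons x xs ih =>
    by_cases h : q x = true <;> simp [h, List.foldl, ih]

-- A's per-line early-exit counter fold is: some run value along the line equals K
theorem pv_scan_eq {α : Type} (c : String) (K : Int) (e : α → String) (xs : List α)
    (found : Bool) (a : Int) :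
    (xs.foldl (fun (st : Bool × Int) x =>
        if st.1 then st else
          let idx := if e x == c then st.2 + 1 else 0
          (idx == K, idx)) (found, a)).1
      = (found || (pvRuns c a (xs.map e)).any (· == K)) := by
  induction xs generalizing found a with
  | nil => simp [pvRuns]
  | cons x l ih =>
    cases found with
    | true =>
      simp only [List.foldl_cons, if_pos]
      rw [ih]
      simp
    | false =>
      simp only [List.foldl_cons, Bool.false_eq_true, List.map_cons, pvRuns,
        List.any_cons, Bool.false_or]
      rw [ih]
      simp [pvStep]
theorem pvRuns_append (c : String) (a : Int) (l1 l2 : List String) :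
    pvRuns c a (l1 ++ l2) = pvRuns c a l1 ++ pvRuns c (l1.foldl (pvStep c) a) l2 := by
  induction l1 generalizing a with
  | nil => rfl
  | cons x l ih => simp [pvRuns, ih]

theorem pvRun_eq_foldl (c : String) (f : Nat → String) (p : Nat) :
    pvRun c f p = ((List.range (p+1)).map f).foldl (pvStep c) 0 := by
  induction p with
  | zero => simp [pvRun, List.range_succ]
  | succ p ih => simp [pvRun, List.range_succ, ih]

theorem pvRuns_range (c : String) (f : Nat → String) (n : Nat) :
    pvRuns c 0 ((List.range n).map f) = (List.range n).map (pvRun c f) := by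
  induction n with
  | zero => rfl
  | succ n ih =>
    rw [List.range_succ, List.map_append, List.map_append, pvRuns_append, ih]
    congr 1
    cases n with
    | zero => simp [pvRuns, pvRun]
    | succ m =>
      simp only [List.map_cons, List.map_nil, pvRuns]
      rw [← pvRun_eq_foldl]
      simp [pvRun]

-- pvBackLoop basics
theorem pvBackLoop_acc (A : List (List String)) (N : Int) (c : String)
    (fuel : Nat) (i j di dj len : Int) :
    pvBackLoop A N c fuel i j di dj len = len + pvBackLoop A N c fuel i j di dj 0 := by
  induction fuel generalizing i j len with
  | zero => simp [pvBackLoop]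
  | succ fuel ih =>
    simp only [pvBackLoop]
    split
    · rw [ih (i - di) (j - dj) (len + 1), ih (i - di) (j - dj) (0 + 1)]
      ring
    · simp
theorem pvBackLoop_neg (A : List (List String)) (N : Int) (c : String)
    (fuel : Nat) (i j di dj : Int) (h : i < 0 ∨ j < 0) :
    pvBackLoop A N c fuel i j di dj 0 = 0 := by
  cases fuel with
  | zero => rfl
  | succ fuel =>
    simp only [pvBackLoop]
    rw [if_neg]
    rintro ⟨h1, _, h2, _⟩
    omega
theorem pvBackLoop_irrel1 (A : List (List String)) (N : Int) (c : String)
    (dj : Int) (f1 f2 : Nat) (i j : Int) (h1 : i.toNat < f1) (h2 : i.toNat < f2) :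
    pvBackLoop A N c f1 i j 1 dj 0 = pvBackLoop A N c f2 i j 1 dj 0 := by
  induction f1 generalizing f2 i j with
  | zero => omega
  | succ f1 ih =>
    cases f2 with
    | zero => omega
    | succ f2 =>
      simp only [pvBackLoop]
      split
      · rename_i h
        rw [pvBackLoop_acc _ _ _ f1, pvBackLoop_acc _ _ _ f2]
        by_cases hi : i = 0
        · subst hi
          rw [pvBackLoop_neg _ _ _ f1 _ _ _ _ (by omega),
              pvBackLoop_neg _ _ _ f2 _ _ _ _ (by omega)]
        · rw [ih f2 (i - 1) (j - dj) (by omega) (by omega)]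
      · rfl
theorem pvBackLoop_irrel0 (A : List (List String)) (N : Int) (c : String)
    (f1 f2 : Nat) (i j : Int) (h1 : j.toNat < f1) (h2 : j.toNat < f2) :
    pvBackLoop A N c f1 i j 0 1 0 = pvBackLoop A N c f2 i j 0 1 0 := by
  induction f1 generalizing f2 i j with
  | zero => omega
  | succ f1 ih =>
    cases f2 with
    | zero => omega
    | succ f2 =>
      simp only [pvBackLoop, sub_zero]
      split
      · rename_i h
        rw [pvBackLoop_acc _ _ _ f1, pvBackLoop_acc _ _ _ f2]
        by_cases hj : j = 0
        · subst hj
          rw [pvBackLoop_neg _ _ _ f1 _ _ _ _ (by omega),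
              pvBackLoop_neg _ _ _ f2 _ _ _ _ (by omega)]
        · rw [ih f2 i (j - 1) (by omega) (by omega)]
      · rfl
theorem pvBack_unfold1 (A : List (List String)) (N : Int) (c : String) (i j dj : Int) :
    pvBack A N c i j 1 dj =
      if 0 ≤ i ∧ i < N ∧ 0 ≤ j ∧ j < N ∧ pvCell A i j == c then
        1 + pvBack A N c (i - 1) (j - dj) 1 dj
      else 0 := by
  have hL : pvBack A N c i j 1 dj = pvBackLoop A N c (i.toNat + j.toNat + 1) i j 1 dj 0 := rfl
  rw [hL]
  simp only [pvBackLoop]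
  split
  · rename_i h
    rw [pvBackLoop_acc]
    by_cases hi : i = 0
    · subst hi
      rw [pvBackLoop_neg _ _ _ _ _ _ _ _ (by omega)]
      have h2 : pvBack A N c (0 - 1) (j - dj) 1 dj = 0 := by
        unfold pvBack; exact pvBackLoop_neg _ _ _ _ _ _ _ _ (by omega)
      rw [h2]
      norm_num
    · rw [pvBackLoop_irrel1 A N c dj (i.toNat + j.toNat) ((i - 1).toNat + (j - dj).toNat + 1)
            (i - 1) (j - dj) (by omega) (by omega)]
      unfold pvBack
      omega
  · rfl
theorem pvBack_unfold0 (A : List (List String)) (N : Int) (c : String) (i j : Int) :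
    pvBack A N c i j 0 1 =
      if 0 ≤ i ∧ i < N ∧ 0 ≤ j ∧ j < N ∧ pvCell A i j == c then
        1 + pvBack A N c i (j - 1) 0 1
      else 0 := by
  have hL : pvBack A N c i j 0 1 = pvBackLoop A N c (i.toNat + j.toNat + 1) i j 0 1 0 := rfl
  rw [hL]
  simp only [pvBackLoop, sub_zero]
  split
  · rename_i h
    rw [pvBackLoop_acc]
    by_cases hj : j = 0
    · subst hj
      rw [pvBackLoop_neg _ _ _ _ _ _ _ _ (by omega)]
      have h2 : pvBack A N c i (0 - 1) 0 1 = 0 := by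
        unfold pvBack; exact pvBackLoop_neg _ _ _ _ _ _ _ _ (by omega)
      rw [h2]
      norm_num
    · rw [pvBackLoop_irrel0 A N c (i.toNat + j.toNat) (i.toNat + (j - 1).toNat + 1)
            i (j - 1) (by omega) (by omega)]
      unfold pvBack
      omega
  · rfl
theorem pvBack_row (A : List (List String)) (N : Int) (c : String) (i j : Nat)
    (hi : i < N.toNat) (hj : j < N.toNat) :
    pvBack A N c (i : Int) (j : Int) 0 1 = pvRun c (fun t => pvCell A (i : Int) (t : Int)) j := by
  induction j with
  | zero =>
    rw [pvBack_unfold0]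
    simp only [pvRun, pvStep]
    by_cases hm : pvCell A (i : Int) ((0:Nat) : Int) == c
    · rw [if_pos ⟨by omega, by omega, by omega, by omega, hm⟩, if_pos hm]
      have h0 : pvBack A N c (i : Int) (((0:Nat) : Int) - 1) 0 1 = 0 := by
        rw [pvBack_unfold0, if_neg]; rintro ⟨_, _, h, _⟩; omega
      rw [h0]
      omega
    · rw [if_neg (by rintro ⟨_, _, _, _, h⟩; exact hm h), if_neg hm]
  | succ p ih =>
    rw [pvBack_unfold0]
    simp only [pvRun, pvStep]
    by_cases hm : pvCell A (i : Int) ((p+1 : Nat) : Int) == c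
    · rw [if_pos ⟨by omega, by omega, by omega, by omega, hm⟩, if_pos hm]
      rw [show ((p+1 : Nat) : Int) - 1 = ((p : Nat) : Int) by push_cast; ring]
      rw [ih (by omega)]
      omega
    · rw [if_neg (by rintro ⟨_, _, _, _, h⟩; exact hm h), if_neg hm]

theorem pvBack_col (A : List (List String)) (N : Int) (c : String) (i j : Nat)
    (hi : i < N.toNat) (hj : j < N.toNat) :
    pvBack A N c (i : Int) (j : Int) 1 0 = pvRun c (fun t => pvCell A (t : Int) (j : Int)) i := by
  induction i with
  | zero =>
    rw [pvBack_unfold1]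
    simp only [pvRun, pvStep]
    by_cases hm : pvCell A ((0:Nat) : Int) (j : Int) == c
    · rw [if_pos ⟨by omega, by omega, by omega, by omega, hm⟩, if_pos hm]
      have h0 : pvBack A N c (((0:Nat) : Int) - 1) ((j : Int) - 0) 1 0 = 0 := by
        rw [pvBack_unfold1, if_neg]; rintro ⟨h, _⟩; omega
      rw [h0]
      omega
    · rw [if_neg (by rintro ⟨_, _, _, _, h⟩; exact hm h), if_neg hm]
  | succ p ih =>
    rw [pvBack_unfold1]
    simp only [pvRun, pvStep]
    by_cases hm : pvCell A ((p+1 : Nat) : Int) (j : Int) == c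
    · rw [if_pos ⟨by omega, by omega, by omega, by omega, hm⟩, if_pos hm]
      rw [show ((p+1 : Nat) : Int) - 1 = ((p : Nat) : Int) by push_cast; ring,
          show ((j : Nat) : Int) - 0 = ((j : Nat) : Int) by ring]
      rw [ih (by omega)]
      omega
    · rw [if_neg (by rintro ⟨_, _, _, _, h⟩; exact hm h), if_neg hm]

theorem pvBack_diag (A : List (List String)) (N : Int) (c : String) (p i j : Nat)
    (hp : p = min i j) (hi : i < N.toNat) (hj : j < N.toNat) :
    pvBack A N c (i : Int) (j : Int) 1 1 =
      pvRun c (fun t => pvCell A ((i - p + t : Nat) : Int) ((j - p + t : Nat) : Int)) p := by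
  induction p generalizing i j with
  | zero =>
    rw [pvBack_unfold1]
    simp only [pvRun, pvStep]
    simp only [show (i - 0 + 0 : Nat) = i by omega, show (j - 0 + 0 : Nat) = j by omega]
    by_cases hm : pvCell A (i : Int) (j : Int) == c
    · rw [if_pos ⟨by omega, by omega, by omega, by omega, hm⟩, if_pos hm]
      have h0 : pvBack A N c ((i : Int) - 1) ((j : Int) - 1) 1 1 = 0 := by
        rw [pvBack_unfold1, if_neg]; rintro ⟨h1, _, h2, _⟩; omega
      rw [h0]
      omega
    · rw [if_neg (by rintro ⟨_, _, _, _, h⟩; exact hm h), if_neg hm]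
  | succ p ih =>
    obtain ⟨i', rfl⟩ : ∃ i', i = i' + 1 := ⟨i - 1, by omega⟩
    obtain ⟨j', rfl⟩ : ∃ j', j = j' + 1 := ⟨j - 1, by omega⟩
    rw [pvBack_unfold1]
    simp only [pvRun, pvStep]
    simp only [show (i' + 1 - (p + 1) + (p + 1) : Nat) = i' + 1 by omega,
        show (j' + 1 - (p + 1) + (p + 1) : Nat) = j' + 1 by omega]
    by_cases hm : pvCell A ((i'+1 : Nat) : Int) ((j'+1 : Nat) : Int) == c
    · rw [if_pos ⟨by omega, by omega, by omega, by omega, hm⟩, if_pos hm]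
      rw [show ((i'+1 : Nat) : Int) - 1 = ((i' : Nat) : Int) by push_cast; ring,
          show ((j'+1 : Nat) : Int) - 1 = ((j' : Nat) : Int) by push_cast; ring]
      rw [ih i' j' (by omega) (by omega) (by omega)]
      have hfun : (fun t => pvCell A ((i' - p + t : Nat) : Int) ((j' - p + t : Nat) : Int))
          = (fun t => pvCell A ((i' + 1 - (p + 1) + t : Nat) : Int) ((j' + 1 - (p + 1) + t : Nat) : Int)) := by
        funext t
        rw [show (i' + 1 - (p + 1) + t : Nat) = i' - p + t by omega,
            show (j' + 1 - (p + 1) + t : Nat) = j' - p + t by omega]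
      simp only [hfun]
      omega
    · rw [if_neg (by rintro ⟨_, _, _, _, h⟩; exact hm h), if_neg hm]

theorem pvBack_anti (A : List (List String)) (N : Int) (c : String) (p i j : Nat)
    (hp : p = min i (N.toNat - 1 - j)) (hi : i < N.toNat) (hj : j < N.toNat) :
    pvBack A N c (i : Int) (j : Int) 1 (-1) =
      pvRun c (fun t => pvCell A ((i - p + t : Nat) : Int) ((j + p - t : Nat) : Int)) p := by
  induction p generalizing i j with
  | zero =>
    rw [pvBack_unfold1]
    simp only [pvRun, pvStep]
    simp only [show (i - 0 + 0 : Nat) = i by omega, show (j + 0 - 0 : Nat) = j by omega]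
    by_cases hm : pvCell A (i : Int) (j : Int) == c
    · rw [if_pos ⟨by omega, by omega, by omega, by omega, hm⟩, if_pos hm]
      have h0 : pvBack A N c ((i : Int) - 1) ((j : Int) - (-1)) 1 (-1) = 0 := by
        rw [pvBack_unfold1, if_neg]; rintro ⟨h1, _, _, h2, _⟩; omega
      rw [h0]
      omega
    · rw [if_neg (by rintro ⟨_, _, _, _, h⟩; exact hm h), if_neg hm]
  | succ p ih =>
    obtain ⟨i', rfl⟩ : ∃ i', i = i' + 1 := ⟨i - 1, by omega⟩
    rw [pvBack_unfold1]
    simp only [pvRun, pvStep]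
    simp only [show (i' + 1 - (p + 1) + (p + 1) : Nat) = i' + 1 by omega,
        show (j + (p + 1) - (p + 1) : Nat) = j by omega]
    by_cases hm : pvCell A ((i'+1 : Nat) : Int) ((j : Nat) : Int) == c
    · rw [if_pos ⟨by omega, by omega, by omega, by omega, hm⟩, if_pos hm]
      rw [show ((i'+1 : Nat) : Int) - 1 = ((i' : Nat) : Int) by push_cast; ring,
          show ((j : Nat) : Int) - (-1) = ((j + 1 : Nat) : Int) by push_cast; ring]
      rw [ih i' (j+1) (by omega) (by omega) (by omega)]
      have hfun : (fun t => pvCell A ((i' - p + t : Nat) : Int) ((j + 1 + p - t : Nat) : Int))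
          = (fun t => pvCell A ((i' + 1 - (p + 1) + t : Nat) : Int) ((j + (p + 1) - t : Nat) : Int)) := by
        funext t
        rw [show (i' + 1 - (p + 1) + t : Nat) = i' - p + t by omega,
            show (j + (p + 1) - t : Nat) = j + 1 + p - t by omega]
      simp only [hfun]
      omega
    · rw [if_neg (by rintro ⟨_, _, _, _, h⟩; exact hm h), if_neg hm]

-- Nat band filter of a range is a contiguous range'
theorem pv_filter_range (n lo hi : Nat) :
    (List.range n).filter (fun i => decide (lo ≤ i ∧ i < hi)) =
      List.range' lo (min hi n - lo) := by
  induction n with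
  | zero => simp
  | succ n ih =>
    rw [List.range_succ, List.filter_append, ih]
    by_cases h : lo ≤ n ∧ n < hi
    · rw [show (min hi (n+1) - lo) = (min hi n - lo) + 1 by omega, List.range'_concat]
      simp only [List.filter_cons, List.filter_nil]
      rw [if_pos (by simpa using h)]
      congr 2
      omega
    · rw [show (min hi (n+1) - lo) = (min hi n - lo) by omega]
      simp only [List.filter_cons, List.filter_nil]
      rw [if_neg (by simpa using h)]
      simp

-- pvRun only looks at the first p+1 cells
theorem pvRun_congr (c : String) (f g : Nat → String) (p : Nat)
    (h : ∀ t ≤ p, f t = g t) : pvRun c f p = pvRun c g p := by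
  induction p with
  | zero => simp [pvRun, h 0 (by omega)]
  | succ p ih =>
    simp only [pvRun]
    rw [h (p+1) (by omega), ih (fun t ht => h t (by omega))]

-- the empty case
theorem pv_range_empty (A : List (List String)) (N : Int) (K : Int) (c : String) (hN : N ≤ 0) :
    find A N K c = false ∧ find_alt A N K c = false := by
  have h1 : PySem.List.pyRange 0 N 1 = [] := by
    rw [PySem.List.pyRange_one]
    rw [show (N - 0).toNat = 0 by omega]
    rfl
  have h2 : PySem.List.pyRange 0 (2*N) 1 = [] := by
    rw [PySem.List.pyRange_one]
    rw [show (2*N - 0).toNat = 0 by omega]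
    rfl
  constructor
  · simp [find, h1, h2]
  · simp [find_alt, h1]

-- A in normal form: for each of the four line families, some run value along a line equals K
theorem find_eq (A : List (List String)) (N : Int) (K : Int) (c : String) :
    find A N K c =
      (((List.range N.toNat).any fun i => (List.range N.toNat).any fun j =>
          pvRun c (fun t => pvCell A (i : Int) (t : Int)) j == K)
       || ((List.range N.toNat).any fun i => (List.range N.toNat).any fun j =>
          pvRun c (fun t => pvCell A (t : Int) (i : Int)) j == K)
       || ((List.range (2*N.toNat)).any fun v =>
            (List.range (min (v+1) N.toNat - (v+1-N.toNat))).any fun p =>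
          pvRun c (fun t => pvCell A ((v+1-N.toNat+t : Nat) : Int) ((v : Int) - ((v+1-N.toNat+t : Nat) : Int))) p == K)
       || ((List.range (2*N.toNat)).any fun v =>
            (List.range (min (2*N.toNat-v) N.toNat - (N.toNat-v))).any fun p =>
          pvRun c (fun t => pvCell A ((N.toNat-v+t : Nat) : Int) ((v : Int) + ((N.toNat-v+t : Nat) : Int) - N)) p == K)) := by
  by_cases hN : N ≤ 0
  · rw [(pv_range_empty A N K c hN).1, show N.toNat = 0 by omega]
    simp
  · have hR : PySem.List.pyRange 0 N 1 = (List.range N.toNat).map (fun k : Nat => (k : Int)) := by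
      rw [PySem.List.pyRange_one, show (N - 0).toNat = N.toNat by omega]
      simp
    have hR2 : PySem.List.pyRange 0 (2*N) 1 = (List.range (2*N.toNat)).map (fun k : Nat => (k : Int)) := by
      rw [PySem.List.pyRange_one, show (2*N - 0).toNat = 2*N.toNat by omega]
      simp
    unfold find
    simp only [pv_foldl_or, Bool.false_or]
    rw [pv_if_or]
    simp only [pv_any_or]
    have hguard1 : ∀ inv : Int,
        ((PySem.List.pyRange 0 N 1).foldl (fun (st : Bool × Int) i =>
            if st.1 then st else
              if inv - i ≥ N ∨ inv - i < 0 then st else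
              let idx := if pvCell A i (inv - i) == c then st.2 + 1 else 0
              (idx == K, idx)) (false, 0)).1
        = (((PySem.List.pyRange 0 N 1).filter (fun i => decide (0 ≤ inv - i ∧ inv - i < N))).foldl
            (fun (st : Bool × Int) i =>
              if st.1 then st else
                let idx := if pvCell A i (inv - i) == c then st.2 + 1 else 0
                (idx == K, idx)) (false, 0)).1 := by
      intro inv
      rw [← pv_foldl_guard]
      congr 1
      congr 1
      funext st i
      split_ifs <;> first | rfl | (exfalso; simp only [decide_eq_true_eq] at *; omega)
    have hguard2 : ∀ inv : Int,
        ((PySem.List.pyRange 0 N 1).foldl (fun (st : Bool × Int) i =>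
            if st.1 then st else
              if i + inv - N ≥ N ∨ i + inv - N < 0 then st else
              let idx := if pvCell A i (inv + i - N) == c then st.2 + 1 else 0
              (idx == K, idx)) (false, 0)).1
        = (((PySem.List.pyRange 0 N 1).filter (fun i => decide (0 ≤ inv + i - N ∧ inv + i - N < N))).foldl
            (fun (st : Bool × Int) i =>
              if st.1 then st else
                let idx := if pvCell A i (inv + i - N) == c then st.2 + 1 else 0
                (idx == K, idx)) (false, 0)).1 := by
      intro inv
      rw [← pv_foldl_guard]
      congr 1
      congr 1
      funext st i
      split_ifs <;> first | rfl | (exfalso; simp only [decide_eq_true_eq] at *; omega)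
    simp only [hguard1, hguard2]
    simp only [pv_scan_eq, Bool.false_or]
    have hrow : ((PySem.List.pyRange 0 N 1).any fun i =>
        (pvRuns c 0 (List.map (pvCell A i) (PySem.List.pyRange 0 N 1))).any fun x => x == K)
        = ((List.range N.toNat).any fun i => (List.range N.toNat).any fun j =>
            pvRun c (fun t => pvCell A (i : Int) (t : Int)) j == K) := by
      rw [hR]
      simp only [List.any_map, List.map_map]
      apply pv_any_congr
      intro i _
      simp only [Function.comp_def]
      rw [pvRuns_range]
      simp only [List.any_map, Function.comp_def]
    have hcol : ((PySem.List.pyRange 0 N 1).any fun i =>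
        (pvRuns c 0 (List.map (fun x => pvCell A x i) (PySem.List.pyRange 0 N 1))).any fun x => x == K)
        = ((List.range N.toNat).any fun i => (List.range N.toNat).any fun j =>
            pvRun c (fun t => pvCell A (t : Int) (i : Int)) j == K) := by
      rw [hR]
      simp only [List.any_map, List.map_map]
      apply pv_any_congr
      intro i _
      simp only [Function.comp_def]
      rw [pvRuns_range]
      simp only [List.any_map, Function.comp_def]
    have hanti : ((PySem.List.pyRange 0 (2*N) 1).any fun v =>
        (pvRuns c 0 (List.map (fun x => pvCell A x (v - x))
            (List.filter (fun i => decide (0 ≤ v - i ∧ v - i < N)) (PySem.List.pyRange 0 N 1)))).any fun x => x == K)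
        = ((List.range (2*N.toNat)).any fun v =>
            (List.range (min (v+1) N.toNat - (v+1-N.toNat))).any fun p =>
              pvRun c (fun t => pvCell A ((v+1-N.toNat+t : Nat) : Int) ((v : Int) - ((v+1-N.toNat+t : Nat) : Int))) p == K) := by
      rw [hR, hR2]
      simp only [List.any_map]
      apply pv_any_congr
      intro v hv
      rw [List.mem_range] at hv
      simp only [Function.comp_def, List.filter_map, List.map_map]
      rw [List.filter_congr (q := fun i : Nat => decide (v+1-N.toNat ≤ i ∧ i < v+1))
            (by intro a ha; rw [List.mem_range] at ha; simp only [decide_eq_decide]; omega),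
          pv_filter_range, List.range'_eq_map_range, List.map_map]
      simp only [Function.comp_def]
      rw [pvRuns_range]
      simp only [List.any_map, Function.comp_def]
    have hmain : ((PySem.List.pyRange 0 (2*N) 1).any fun v =>
        (pvRuns c 0 (List.map (fun x => pvCell A x (v + x - N))
            (List.filter (fun i => decide (0 ≤ v + i - N ∧ v + i - N < N)) (PySem.List.pyRange 0 N 1)))).any fun x => x == K)
        = ((List.range (2*N.toNat)).any fun v =>
            (List.range (min (2*N.toNat-v) N.toNat - (N.toNat-v))).any fun p =>
              pvRun c (fun t => pvCell A ((N.toNat-v+t : Nat) : Int) ((v : Int) + ((N.toNat-v+t : Nat) : Int) - N)) p == K) := by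
      rw [hR, hR2]
      simp only [List.any_map]
      apply pv_any_congr
      intro v hv
      rw [List.mem_range] at hv
      simp only [Function.comp_def, List.filter_map, List.map_map]
      rw [List.filter_congr (q := fun i : Nat => decide (N.toNat-v ≤ i ∧ i < 2*N.toNat-v))
            (by intro a ha; rw [List.mem_range] at ha; simp only [decide_eq_decide]; omega),
          pv_filter_range, List.range'_eq_map_range, List.map_map]
      simp only [Function.comp_def]
      rw [pvRuns_range]
      simp only [List.any_map, Function.comp_def]
    rw [hrow, hcol, hanti, hmain]
    simp only [Bool.or_assoc]

-- B in normal form: at each cell the four directional run lengths are compared with K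
theorem find_alt_eq (A : List (List String)) (N : Int) (K : Int) (c : String) :
    find_alt A N K c =
      ((List.range N.toNat).any fun i => (List.range N.toNat).any fun j =>
        (K == pvRun c (fun t => pvCell A (i : Int) (t : Int)) j)
        || (K == pvRun c (fun t => pvCell A (t : Int) (j : Int)) i)
        || (K == pvRun c (fun t => pvCell A ((i - min i j + t : Nat) : Int) ((j - min i j + t : Nat) : Int)) (min i j))
        || (K == pvRun c (fun t => pvCell A ((i - min i (N.toNat-1-j) + t : Nat) : Int) ((j + min i (N.toNat-1-j) - t : Nat) : Int)) (min i (N.toNat-1-j)))) := by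
  by_cases hN : N ≤ 0
  · rw [(pv_range_empty A N K c hN).2, show N.toNat = 0 by omega]
    rfl
  · have hR : PySem.List.pyRange 0 N 1 = (List.range N.toNat).map (fun k : Nat => (k : Int)) := by
      rw [PySem.List.pyRange_one, show (N - 0).toNat = N.toNat by omega]
      simp
    unfold find_alt
    rw [hR]
    simp only [List.any_map]
    apply pv_any_congr
    intro i hi
    simp only [Function.comp]
    apply pv_any_congr
    intro j hj
    rw [List.mem_range] at hi hj
    simp only [Function.comp_apply, List.any_cons, List.any_nil, Bool.or_false]
    rw [pvBack_row A N c i j hi hj, pvBack_col A N c i j hi hj,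
        pvBack_diag A N c (min i j) i j rfl hi hj,
        pvBack_anti A N c (min i (N.toNat-1-j)) i j rfl hi hj]
    simp only [Bool.or_assoc]

theorem pv_main (A : List (List String)) (N : Int) (K : Int) (c : String) :
    find A N K c = find_alt A N K c := by
  rw [find_eq, find_alt_eq]
  rw [Bool.eq_iff_iff]
  simp only [Bool.or_eq_true, List.any_eq_true, List.mem_range, beq_iff_eq]
  constructor
  · rintro (((⟨i, hi, j, hj, h⟩ | ⟨i, hi, j, hj, h⟩) | ⟨v, hv, p, hp, h⟩) | ⟨v, hv, p, hp, h⟩)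
    · exact ⟨i, hi, j, hj, Or.inl (Or.inl (Or.inl h.symm))⟩
    · exact ⟨j, hj, i, hi, Or.inl (Or.inl (Or.inr h.symm))⟩
    · -- anti-diagonal family (inv - i) ↔ direction (1,-1)
      refine ⟨v+1-N.toNat+p, by omega, v-(v+1-N.toNat+p), by omega, Or.inr ?_⟩
      rw [show min (v+1-N.toNat+p) (N.toNat-1-(v-(v+1-N.toNat+p))) = p by omega, ← h]
      apply pvRun_congr
      intro t ht
      rw [show (v+1-N.toNat+p-p+t : Nat) = v+1-N.toNat+t by omega,
          show ((v-(v+1-N.toNat+p)+p-t : Nat) : Int) = (v : Int) - ((v+1-N.toNat+t : Nat) : Int) by omega]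
    · -- main-diagonal family (inv + i - N) ↔ direction (1,1)
      refine ⟨N.toNat-v+p, by omega, v+(N.toNat-v+p)-N.toNat, by omega, Or.inl (Or.inr ?_)⟩
      rw [show min (N.toNat-v+p) (v+(N.toNat-v+p)-N.toNat) = p by omega, ← h]
      apply pvRun_congr
      intro t ht
      rw [show (N.toNat-v+p-p+t : Nat) = N.toNat-v+t by omega,
          show ((v+(N.toNat-v+p)-N.toNat-p+t : Nat) : Int) = (v : Int) + ((N.toNat-v+t : Nat) : Int) - N by omega]
  · rintro ⟨i, hi, j, hj, (((h | h) | h) | h)⟩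
    · exact Or.inl (Or.inl (Or.inl ⟨i, hi, j, hj, h.symm⟩))
    · exact Or.inl (Or.inl (Or.inr ⟨j, hj, i, hi, h.symm⟩))
    · -- direction (1,1) ↔ main-diagonal family, inv = N + j - i
      refine Or.inr ⟨N.toNat+j-i, by omega, min i j, by omega, ?_⟩
      rw [h]
      apply pvRun_congr
      intro t ht
      rw [show (N.toNat-(N.toNat+j-i)+t : Nat) = i - min i j + t by omega,
          show ((N.toNat+j-i : Nat) : Int) + ((i - min i j + t : Nat) : Int) - N
             = ((j - min i j + t : Nat) : Int) by omega]
    · -- direction (1,-1) ↔ anti-diagonal family, inv = i + j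
      refine Or.inl (Or.inr ⟨i+j, by omega, min i (N.toNat-1-j), by omega, ?_⟩)
      rw [h]
      apply pvRun_congr
      intro t ht
      rw [show (i+j+1-N.toNat+t : Nat) = i - min i (N.toNat-1-j) + t by omega,
          show ((i+j : Nat) : Int) - ((i - min i (N.toNat-1-j) + t : Nat) : Int)
             = ((j + min i (N.toNat-1-j) - t : Nat) : Int) by omega]

-- ===== VERDICT (by name: the statement is the Claim_ definition above) =====
theorem find_spec : Claim_equal_find := by
  intro A N K c _ _
  exact pv_main A N K c
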